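-- pv_equiv track=rewrite | github.com/miliar/Code_Jam_Webscraper | solutions_python/Problem_155/65.py | solve
-- ===== SOURCE A (Python) =====
-- def solve(s_max,s):
--     stand = 0
--     friends = 0
--
--     # simulate stand up
--     for level in range(s_max+1):
--         # check if friends are needed for next level
--         neededFriends = max(level-stand,0)
--         stand += int(s[level]) + neededFriends
--         friends += neededFriends
--
--     return friends
-- ===== SOURCE B (Python) =====
-- def solve(s_max, s):
--     # Stage 1: table of real cumulative standing counts (prefix sums).
--     sums = [0]
--     for level in range(s_max + 1):
--         sums.append(sums[-1] + int(s[level]))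
--     # Stage 2: the answer is the largest prefix deficit level - sums[level].
--     best = 0
--     for level in range(s_max + 1):
--         if level - sums[level] > best:
--             best = level - sums[level]
--     return best
-- ===== Notes on version B (the rewrite author's own statement) =====
-- stated objective: alternative
-- what changed: B replaces A's single-pass simulation (friends feeding back into the standing count) by two staged passes: first build a prefix-sum table of the real audience, then scan it for the maximum prefix deficit, which is the answer.
import Mathlib
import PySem

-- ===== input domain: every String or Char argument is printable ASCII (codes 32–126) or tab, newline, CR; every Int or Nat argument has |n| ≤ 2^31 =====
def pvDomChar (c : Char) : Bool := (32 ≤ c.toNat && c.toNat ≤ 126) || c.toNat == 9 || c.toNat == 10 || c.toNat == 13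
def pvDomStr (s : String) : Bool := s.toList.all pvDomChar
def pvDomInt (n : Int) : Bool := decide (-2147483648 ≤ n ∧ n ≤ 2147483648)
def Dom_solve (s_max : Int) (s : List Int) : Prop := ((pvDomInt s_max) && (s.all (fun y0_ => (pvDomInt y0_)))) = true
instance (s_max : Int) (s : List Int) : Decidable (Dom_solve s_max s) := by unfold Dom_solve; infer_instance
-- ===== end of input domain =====

-- B builds a prefix-sum table of the real audience in one pass, then scans it for the
-- maximum prefix deficit in a second pass, instead of A's single simulation where
-- invited friends feed back into the standing count (alternative decomposition).


-- ===== PORT A =====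
-- s[level]: under Pre_solve every accessed index is in range, so the getD default never fires
def solve (s_max : Int) (s : List Int) : Int :=
  ((PySem.List.pyRange 0 (s_max + 1) 1).foldl
    (fun st level =>
      let neededFriends := max (level - st.1) 0
      (st.1 + (PySem.List.pyGet? s level).getD 0 + neededFriends, st.2 + neededFriends))
    (0, 0)).2

-- ===== PORT B =====
def solve_alt (s_max : Int) (s : List Int) : Int :=
  let sums := (PySem.List.pyRange 0 (s_max + 1) 1).foldl
      (fun acc level =>
        acc ++ [(PySem.List.pyGet? acc (-1)).getD 0 + (PySem.List.pyGet? s level).getD 0])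
      [0]
  (PySem.List.pyRange 0 (s_max + 1) 1).foldl
      (fun best level =>
        if level - (PySem.List.pyGet? sums level).getD 0 > best
        then level - (PySem.List.pyGet? sums level).getD 0
        else best)
      0

-- ===== PRECONDITION & SPEC =====
-- Pre_ excludes exactly the inputs where s[level] raises IndexError in A (and in B): s_max ≥ len(s)
def Pre_solve (s_max : Int) (s : List Int) : Prop := s_max < (s.length : Int)
instance (s_max : Int) (s : List Int) : Decidable (Pre_solve s_max s) := by unfold Pre_solve; infer_instance
def pvWitness_solve : Int × List Int := (2, [0, 1, 2])
def Spec_solve (s_max : Int) (s : List Int) (out : Int) : Prop := out = solve_alt s_max s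
instance (s_max : Int) (s : List Int) (out : Int) : Decidable (Spec_solve s_max s out) := by unfold Spec_solve; infer_instance

-- ===== CLAIM (what is proved, stated in full; the proofs are below) =====
def Claim_equal_solve : Prop := ∀ (s_max : Int) (s : List Int), Dom_solve s_max s → Pre_solve s_max s → Spec_solve s_max s (solve s_max s)

-- ===== LEMMAS AND PROOFS =====

-- prefix sum of g over the first k levels
def preS (g : Int → Int) (k : Nat) : Int := ((List.range k).map (fun i => g (i : Int))).sum

-- running maximum of the prefix deficits level - preS level, over levels 0..n-1
def runM (g : Int → Int) : Nat → Int
  | 0 => 0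
  | n + 1 => if (n : Int) - preS g n > runM g n then (n : Int) - preS g n else runM g n

theorem preS_succ (g : Int → Int) (n : Nat) : preS g (n + 1) = preS g n + g n := by
  simp [preS, List.range_succ]

-- Invariant for A: A's state is (b + f, f) whenever the running-max pair state is (b, f).
theorem solve_fold_inv (l : List Int) (g : Int → Int) (b f : Int) :
    (l.foldl (fun st level =>
        let neededFriends := max (level - st.1) 0
        (st.1 + g level + neededFriends, st.2 + neededFriends)) (b + f, f)).2
    = (l.foldl (fun st level =>
        (st.1 + g level, if level - st.1 > st.2 then level - st.1 else st.2)) (b, f)).2 := by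
  induction l generalizing b f with
  | nil => rfl
  | cons x xs ih =>
      simp only [List.foldl]
      have hf : f + max (x - (b + f)) 0 = (if x - b > f then x - b else f) := by
        rcases le_total (x - (b + f)) 0 with h | h
        · rw [max_eq_right h]; split <;> omega
        · rw [max_eq_left h]; split <;> omega
      have hb : b + f + g x + max (x - (b + f)) 0
          = (b + g x) + (if x - b > f then x - b else f) := by
        rcases le_total (x - (b + f)) 0 with h | h
        · rw [max_eq_right h]; split <;> omega
        · rw [max_eq_left h]; split <;> omega
      rw [show (b + f + g x + max (x - (b + f)) 0, f + max (x - (b + f)) 0)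
            = ((b + g x) + (if x - b > f then x - b else f),
               (if x - b > f then x - b else f)) from by rw [hf, hb]]
      exact ih (b + g x) _

-- The running-max pair fold computes (prefix sum, running max).
theorem runmax_fold_eq (g : Int → Int) (n : Nat) :
    (PySem.List.pyRange 0 (n : Int) 1).foldl
      (fun st level => (st.1 + g level, if level - st.1 > st.2 then level - st.1 else st.2))
      (0, 0)
    = (preS g n, runM g n) := by
  induction n with
  | zero => simp [PySem.List.pyRange_one_eq_nil, preS, runM]
  | succ n ih =>
      have h : (PySem.List.pyRange 0 ((n : Int) + 1) 1)
          = PySem.List.pyRange 0 (n : Int) 1 ++ [(n : Int)] :=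
        PySem.List.pyRange_one_succ_right (by positivity)
      rw [show ((n + 1 : Nat) : Int) = (n : Int) + 1 by push_cast; ring, h,
        List.foldl_append, ih]
      simp [runM, preS_succ]

-- B's first pass builds exactly the table of prefix sums.
theorem sums_eq (g : Int → Int) (n : Nat) :
    (PySem.List.pyRange 0 (n : Int) 1).foldl
      (fun acc level => acc ++ [(PySem.List.pyGet? acc (-1)).getD 0 + g level]) [0]
    = (List.range (n + 1)).map (fun k => preS g k) := by
  induction n with
  | zero => simp [PySem.List.pyRange_one_eq_nil, preS]
  | succ n ih =>
      have h : (PySem.List.pyRange 0 ((n : Int) + 1) 1)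
          = PySem.List.pyRange 0 (n : Int) 1 ++ [(n : Int)] :=
        PySem.List.pyRange_one_succ_right (by positivity)
      rw [show ((n + 1 : Nat) : Int) = (n : Int) + 1 by push_cast; ring, h,
        List.foldl_append, ih]
      rw [show (List.range (n + 1)).map (fun k => preS g k)
            = (List.range n).map (fun k => preS g k) ++ [preS g n] by
          simp [List.range_succ]]
      simp only [List.foldl]
      rw [PySem.List.pyGet?_neg_one_append_singleton]
      simp [List.range_succ, preS_succ]

-- B's second pass over the prefix-sum table computes the running maximum.
theorem pass2_eq (g : Int → Int) (n m : Nat) (hnm : n ≤ m) :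
    (PySem.List.pyRange 0 (n : Int) 1).foldl
      (fun best level =>
        if level - (PySem.List.pyGet? ((List.range (m + 1)).map (fun k => preS g k)) level).getD 0 > best
        then level - (PySem.List.pyGet? ((List.range (m + 1)).map (fun k => preS g k)) level).getD 0
        else best) 0
    = runM g n := by
  induction n with
  | zero => simp [PySem.List.pyRange_one_eq_nil, runM]
  | succ n ih =>
      have h : (PySem.List.pyRange 0 ((n : Int) + 1) 1)
          = PySem.List.pyRange 0 (n : Int) 1 ++ [(n : Int)] :=
        PySem.List.pyRange_one_succ_right (by positivity)
      rw [show ((n + 1 : Nat) : Int) = (n : Int) + 1 by push_cast; ring, h,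
        List.foldl_append, ih (by omega)]
      have hget : (PySem.List.pyGet?
          ((List.range (m + 1)).map (fun k => preS g k)) (n : Int)).getD 0 = preS g n := by
        rw [PySem.List.pyGet?_natCast]
        simp [List.getElem?_map, List.getElem?_range (show n < m + 1 by omega)]
      simp only [List.foldl, hget, runM]

-- ===== VERDICT (by name: the statement is the Claim_ definition above) =====
theorem solve_spec : Claim_equal_solve := by
  intro s_max s _ _
  unfold Spec_solve solve solve_alt
  set g : Int → Int := fun level => (PySem.List.pyGet? s level).getD 0 with hg
  rcases le_or_gt (s_max + 1) 0 with hneg | hpos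
  · rw [PySem.List.pyRange_one_eq_nil hneg]
    rfl
  · obtain ⟨n, hn⟩ : ∃ n : Nat, (n : Int) = s_max + 1 :=
      ⟨(s_max + 1).toNat, Int.toNat_of_nonneg (by omega)⟩
    rw [← hn]
    calc ((PySem.List.pyRange 0 (n : Int) 1).foldl
            (fun st level =>
              let neededFriends := max (level - st.1) 0
              (st.1 + g level + neededFriends, st.2 + neededFriends)) (0, 0)).2
        = ((PySem.List.pyRange 0 (n : Int) 1).foldl
            (fun st level =>
              (st.1 + g level, if level - st.1 > st.2 then level - st.1 else st.2)) (0, 0)).2 := by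
          simpa using solve_fold_inv (PySem.List.pyRange 0 (n : Int) 1) g 0 0
      _ = runM g n := by rw [runmax_fold_eq]
      _ = _ := by rw [sums_eq g n, pass2_eq g n n le_rfl]
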